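-- pv_equiv track=rewrite | github.com/sanavs2004/RProject | modules/github_verification.py | _check_skill_in_repos
-- ===== SOURCE A (Python) =====
-- def _check_skill_in_repos(skill, repos):
--     """Check if skill is mentioned in repo descriptions"""
--     skill_lower = skill.lower()
--     for repo in repos[:10]:  # Check top 10 repos
--         desc = repo.get('description', '')
--         if desc and skill_lower in desc.lower():
--             return True
--
--         name = repo.get('name', '')
--         if name and skill_lower in name.lower():
--             return True
--
--     return False
-- ===== SOURCE B (Python) =====
-- def _check_skill_in_repos(skill, repos):
--     """Check if skill is mentioned in repo descriptions"""
--     fields = []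
--     for repo in repos[:10]:
--         for key in ('description', 'name'):
--             value = repo.get(key, '')
--             if value:
--                 fields.append(value)
--     if not fields:
--         return False
--     # one aggregate scan; NUL separator so a match can never span two fields
--     return skill.lower() in "\0".join(fields).lower()
-- ===== Notes on version B (the rewrite author's own statement) =====
-- stated objective: alternative
-- what changed: Replaced the per-repo early-return loop doing up to 20 separate substring searches with a build-then-single-scan shape: collect the truthy fields of the first 10 repos, join them with a NUL separator (which cannot occur in the skill), lowercase the aggregate once, and run ONE substring search over it.
import Mathlib
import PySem

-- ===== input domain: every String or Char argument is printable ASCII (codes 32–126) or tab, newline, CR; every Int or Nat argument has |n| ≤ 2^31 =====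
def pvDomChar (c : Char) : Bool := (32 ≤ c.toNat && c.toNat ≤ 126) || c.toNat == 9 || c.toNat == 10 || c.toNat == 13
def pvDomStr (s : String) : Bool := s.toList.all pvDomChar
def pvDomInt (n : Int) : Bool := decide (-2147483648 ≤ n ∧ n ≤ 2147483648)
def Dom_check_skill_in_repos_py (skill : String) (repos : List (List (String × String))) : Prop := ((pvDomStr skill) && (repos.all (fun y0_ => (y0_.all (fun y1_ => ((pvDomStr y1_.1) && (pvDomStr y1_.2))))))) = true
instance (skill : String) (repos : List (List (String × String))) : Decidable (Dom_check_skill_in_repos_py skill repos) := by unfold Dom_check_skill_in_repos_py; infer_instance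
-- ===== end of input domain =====

-- B builds ONE aggregate NUL-joined lowercased string and runs a single substring scan,
-- instead of A's per-repo early-return loop with up to 20 separate scans; same cost (objective: alternative).

-- ===== PORT A =====
-- repo.get(k, '') on the association list (first match, '' when absent) — shared dict primitive
def pvGetField (repo : List (String × String)) (k : String) : String :=
  (repo.lookup k).getD ""

-- the body of A's 'for repo in repos[:10]' loop with its two early returns
def pvLoopA (skillLower : String) : List (List (String × String)) → Bool
  | [] => false
  | repo :: rest =>
    let desc := pvGetField repo "description"
    if !desc.toList.isEmpty && PySem.Str.isIn skillLower (PySem.Str.lower desc) then true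
    else
      let name := pvGetField repo "name"
      if !name.toList.isEmpty && PySem.Str.isIn skillLower (PySem.Str.lower name) then true
      else pvLoopA skillLower rest

def check_skill_in_repos_py (skill : String) (repos : List (List (String × String))) : Bool :=
  let skillLower := PySem.Str.lower skill
  pvLoopA skillLower (PySem.List.slice repos none (some 10))

-- ===== PORT B =====
def check_skill_in_repos_py_alt (skill : String) (repos : List (List (String × String))) : Bool :=
  -- collect the truthy fields of the first 10 repos (nested for-loop with append = flatMap/filter)
  let fields :=
    (PySem.List.slice repos none (some 10)).flatMap
      (fun repo => (["description", "name"].map (fun k => pvGetField repo k)).filter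
        (fun v => !v.toList.isEmpty))
  if fields.isEmpty then false
  else
    -- skill.lower() in "\0".join(fields).lower() — one scan over the aggregate string
    PySem.Str.isIn (PySem.Str.lower skill)
      (PySem.Str.lower (PySem.Str.join (String.ofList ['\x00']) fields))

-- ===== PRECONDITION & SPEC =====
def Spec_check_skill_in_repos_py (skill : String) (repos : List (List (String × String))) (out : Bool) : Prop := out = check_skill_in_repos_py_alt skill repos
instance (skill : String) (repos : List (List (String × String))) (out : Bool) : Decidable (Spec_check_skill_in_repos_py skill repos out) := by unfold Spec_check_skill_in_repos_py; infer_instance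

-- ===== CLAIM (what is proved, stated in full; the proofs are below) =====
def Claim_equal_check_skill_in_repos_py : Prop := ∀ (skill : String) (repos : List (List (String × String))), Dom_check_skill_in_repos_py skill repos → Spec_check_skill_in_repos_py skill repos (check_skill_in_repos_py skill repos)

-- ===== LEMMAS AND PROOFS =====
-- characterization of A's early-return loop as a single any over the repos
theorem pvLoopA_eq_any (sl : String) (rs : List (List (String × String))) :
    pvLoopA sl rs =
      rs.any (fun repo =>
        (!(pvGetField repo "description").toList.isEmpty
            && PySem.Str.isIn sl (PySem.Str.lower (pvGetField repo "description")))
        || (!(pvGetField repo "name").toList.isEmpty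
            && PySem.Str.isIn sl (PySem.Str.lower (pvGetField repo "name")))) := by
  induction rs with
  | nil => rfl
  | cons repo rest ih =>
    simp only [pvLoopA, List.any_cons, ih]
    split_ifs with h1 h2 <;> simp_all

-- lower is applied code point by code point, so it distributes over ++
theorem pvLower_append (a b : List Char) :
    PySem.Chars.lower (a ++ b) = PySem.Chars.lower a ++ PySem.Chars.lower b := by
  simp [PySem.Chars.lower]

-- a NUL-free pattern is an infix of a ++ '\x00' :: b iff it is an infix of a or of b
theorem pvInfix_split {s a b : List Char} (hc : '\x00' ∉ s) :
    s <:+: a ++ '\x00' :: b ↔ s <:+: a ∨ s <:+: b := by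
  constructor
  · rintro ⟨t, u, h⟩
    rw [List.append_assoc] at h
    rcases List.append_eq_append_iff.mp h with ⟨as, ha, hsu⟩ | ⟨bs, _, hb⟩
    · rcases List.append_eq_append_iff.mp hsu with ⟨ds, hds, _⟩ | ⟨ws, hws, hw⟩
      · exact Or.inl ⟨t, ds, by rw [ha, hds, List.append_assoc]⟩
      · cases ws with
        | nil => exact Or.inl ⟨t, [], by simp at hws; rw [ha, hws]; simp⟩
        | cons w ws' =>
          exfalso
          have : w = '\x00' := (List.cons.injEq _ _ _ _ ▸ hw.symm).1
          exact hc (hws ▸ List.mem_append_right as (this ▸ List.mem_cons_self))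
    · cases bs with
      | nil =>
        simp at hb
        cases s with
        | nil => exact Or.inl (List.nil_infix)
        | cons x s' =>
          exfalso
          have : x = '\x00' := (List.cons.injEq _ _ _ _ ▸ hb).1.symm
          exact hc (this ▸ List.mem_cons_self)
      | cons x bs' =>
        have hx : b = bs' ++ (s ++ u) := (List.cons.injEq _ _ _ _ ▸ hb).2
        exact Or.inr ⟨bs', u, by rw [hx, List.append_assoc]⟩
  · rintro (⟨t, u, h⟩ | ⟨t, u, h⟩)
    · exact ⟨t, u ++ '\x00' :: b, by rw [← h]; simp⟩
    · exact ⟨a ++ '\x00' :: t, u, by rw [← h]; simp⟩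

-- scanning the lowercased NUL-joined aggregate equals scanning each lowercased field
theorem pvIsIn_lower_join (s : List Char) (hs : '\x00' ∉ s) :
    ∀ fs : List (List Char), fs ≠ [] →
      PySem.Chars.isIn s (PySem.Chars.lower (PySem.Chars.join ['\x00'] fs))
        = fs.any (fun f => PySem.Chars.isIn s (PySem.Chars.lower f))
  | [], h => absurd rfl h
  | [f], _ => by simp [PySem.Chars.join_singleton]
  | f :: g :: rest, _ => by
    rw [PySem.Chars.join_cons_cons, List.append_assoc, pvLower_append]
    have hsep : PySem.Chars.lower (['\x00'] ++ PySem.Chars.join ['\x00'] (g :: rest))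
        = '\x00' :: PySem.Chars.lower (PySem.Chars.join ['\x00'] (g :: rest)) := by
      rw [pvLower_append]; rfl
    rw [hsep, List.any_cons]
    rw [Bool.eq_iff_iff]
    simp only [PySem.Chars.isIn_iff_infix, pvInfix_split hs, Bool.or_eq_true]
    rw [← pvIsIn_lower_join s hs (g :: rest) (by simp)]
    simp [PySem.Chars.isIn_iff_infix]

-- lowercasing a string of domain characters never produces a NUL
theorem pvNul_not_mem_lower (s : List Char) (h : s.all pvDomChar = true) :
    '\x00' ∉ PySem.Chars.lower s := by
  have hmap : PySem.Chars.lower s = s.map PySem.Chars.lowerChar := by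
    simp [PySem.Chars.lower]
  rw [hmap]
  intro hmem
  rcases List.mem_map.mp hmem with ⟨c, hc, hlc⟩
  have hdom : pvDomChar c = true := List.all_eq_true.mp h c hc
  have h0 : (PySem.Chars.lowerChar c).toNat = 0 := by rw [hlc]; rfl
  unfold PySem.Chars.lowerChar at h0
  split at h0
  · have hd : c.toNat ≤ 126 := by
      unfold pvDomChar at hdom
      simp at hdom
      omega
    rw [Char.toNat_ofNat, if_pos (Or.inl (by omega : c.toNat + 32 < 55296))] at h0
    omega
  · unfold pvDomChar at hdom
    simp at hdom
    omega

-- ===== VERDICT (by name: the statement is the Claim_ definition above) =====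
theorem check_skill_in_repos_py_spec : Claim_equal_check_skill_in_repos_py := by
  intro skill repos hdom
  unfold Spec_check_skill_in_repos_py check_skill_in_repos_py check_skill_in_repos_py_alt
  rw [pvLoopA_eq_any]
  set fields :=
    (PySem.List.slice repos none (some 10)).flatMap
      (fun repo => (["description", "name"].map (fun k => pvGetField repo k)).filter
        (fun v => !v.toList.isEmpty)) with hfields
  have hA : (PySem.List.slice repos none (some 10)).any (fun repo =>
        (!(pvGetField repo "description").toList.isEmpty
            && PySem.Str.isIn (PySem.Str.lower skill) (PySem.Str.lower (pvGetField repo "description")))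
        || (!(pvGetField repo "name").toList.isEmpty
            && PySem.Str.isIn (PySem.Str.lower skill) (PySem.Str.lower (pvGetField repo "name"))))
      = fields.any (fun f => PySem.Str.isIn (PySem.Str.lower skill) (PySem.Str.lower f)) := by
    rw [hfields]
    simp [List.any_flatMap, List.any_filter]
  rw [hA]
  by_cases hf : fields.isEmpty
  · rw [List.isEmpty_iff.mp hf]; simp
  · rw [if_neg hf]
    have hskill : skill.toList.all pvDomChar = true := by
      have hd := hdom
      unfold Dom_check_skill_in_repos_py pvDomStr at hd
      simp only [Bool.and_eq_true] at hd
      exact hd.1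
    have hs : '\x00' ∉ PySem.Chars.lower skill.toList :=
      pvNul_not_mem_lower skill.toList hskill
    have hfs : fields.map String.toList ≠ [] := by
      simp only [ne_eq, List.map_eq_nil_iff]
      exact fun h => hf (List.isEmpty_iff.mpr h)
    have hjoin := pvIsIn_lower_join (PySem.Chars.lower skill.toList) hs
      (fields.map String.toList) hfs
    simp only [PySem.Str.isIn_eq, PySem.Str.toList_lower, PySem.Str.toList_join]
    rw [show (String.ofList ['\x00']).toList = ['\x00'] from rfl, hjoin]
    simp only [List.any_map]
    rfl
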